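-- pv_equiv track=rewrite | github.com/gysoks/Defi-BIG-DATA | Défi_Big_Data/OD1/fonctions_hachage_classe.py | hachage_paul
-- ===== SOURCE A (Python) =====
-- def hachage_paul(mot,taille_table_hachage):
--     h=[]
--     number=0
--     position=0
--     voyelles=["a","e","i","o","u","y"]
--     for lettre in mot:
--         if lettre in voyelles:
--             h.append(1)
--         else: h.append(2)
--     for i in range(len(h)):
--         number+=h[i]*10**(len(h)-i-1)
--     position=number%taille_table_hachage
--     return position
-- ===== SOURCE B (Python) =====
-- def hachage_paul(mot, taille_table_hachage):
--     # Horner: keep the running value reduced mod the table size at every step.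
--     acc = 0
--     for lettre in mot:
--         d = 1 if lettre in "aeiouy" else 2
--         acc = (acc * 10 + d) % taille_table_hachage
--     return acc
-- ===== Notes on version B (the rewrite author's own statement) =====
-- stated objective: faster
-- what changed: Instead of building a digit list and summing digit*10**(len-i-1) with huge bignum powers, B folds over the word once with Horner's rule, reducing the accumulator mod the table size at each step so numbers stay bounded.
import Mathlib
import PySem

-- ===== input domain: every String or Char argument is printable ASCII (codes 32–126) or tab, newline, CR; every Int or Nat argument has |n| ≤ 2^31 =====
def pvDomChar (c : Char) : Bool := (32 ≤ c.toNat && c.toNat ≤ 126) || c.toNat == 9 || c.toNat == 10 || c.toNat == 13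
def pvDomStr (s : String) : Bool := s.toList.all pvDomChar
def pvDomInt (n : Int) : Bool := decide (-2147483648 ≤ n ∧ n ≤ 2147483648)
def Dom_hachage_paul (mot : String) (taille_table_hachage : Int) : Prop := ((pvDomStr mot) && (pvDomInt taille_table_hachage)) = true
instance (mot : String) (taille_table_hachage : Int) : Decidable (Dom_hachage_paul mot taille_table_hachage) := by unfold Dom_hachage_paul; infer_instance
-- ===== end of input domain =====

-- B replaces A's digit-list + positional bignum sum by a single Horner pass that reduces mod the table size at each step (measured faster, asymptotic).

-- ===== PORT A =====
def hachage_paul (mot : String) (taille_table_hachage : Int) : Int :=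
  let voyelles : List String := ["a", "e", "i", "o", "u", "y"]
  let h : List Int := mot.toList.foldl
    (fun h lettre =>
      if voyelles.contains (String.ofList [lettre]) then h ++ [1] else h ++ [2]) []
  let number : Int := (PySem.List.pyRange 0 (h.length : Int) 1).foldl
    (fun number i =>
      number + PySem.List.pyGetD h i 0 * 10 ^ (((h.length : Int) - i - 1).toNat)) 0
  PySem.Int.mod number taille_table_hachage

-- ===== PORT B =====
-- 'lettre in "aeiouy"' for the single character lettre = character membership
def hachage_paul_alt (mot : String) (taille_table_hachage : Int) : Int :=
  mot.toList.foldl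
    (fun acc lettre =>
      PySem.Int.mod
        (acc * 10 + (if ("aeiouy".toList).contains lettre then 1 else 2))
        taille_table_hachage) 0

-- ===== PRECONDITION & SPEC =====
-- Pre_ excludes exactly taille_table_hachage = 0, where Python's '%' raises ZeroDivisionError.
def Pre_hachage_paul (mot : String) (taille_table_hachage : Int) : Prop :=
  taille_table_hachage ≠ 0
instance (mot : String) (taille_table_hachage : Int) : Decidable (Pre_hachage_paul mot taille_table_hachage) := by unfold Pre_hachage_paul; infer_instance
def pvWitness_hachage_paul : String × Int := ("abc", 7)

def Spec_hachage_paul (mot : String) (taille_table_hachage : Int) (out : Int) : Prop := out = hachage_paul_alt mot taille_table_hachage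
instance (mot : String) (taille_table_hachage : Int) (out : Int) : Decidable (Spec_hachage_paul mot taille_table_hachage out) := by unfold Spec_hachage_paul; infer_instance

-- ===== CLAIM (what is proved, stated in full; the proofs are below) =====
def Claim_equal_hachage_paul : Prop := ∀ (mot : String) (taille_table_hachage : Int), Dom_hachage_paul mot taille_table_hachage → Pre_hachage_paul mot taille_table_hachage → Spec_hachage_paul mot taille_table_hachage (hachage_paul mot taille_table_hachage)

-- ===== LEMMAS AND PROOFS =====

-- the digit A assigns to a letter, phrased as B tests it
def pvDigit (c : Char) : Int := if ("aeiouy".toList).contains c then 1 else 2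

-- value of a digit list read positionally, most significant first
def pvVal : List Int → Int
  | [] => 0
  | d :: tl => d * 10 ^ tl.length + pvVal tl

-- membership of the one-letter string in A's vowel list = char membership in B's vowel string
theorem pv_voy_eq (c : Char) :
    (["a", "e", "i", "o", "u", "y"] : List String).contains (String.ofList [c])
      = ("aeiouy".toList).contains c := by
  simp only [List.contains_eq_mem, List.mem_cons, List.not_mem_nil, or_false,
    ← String.toList_inj]
  simp

theorem pv_hA_eq (cs : List Char) :
    cs.foldl (fun h lettre =>
      if (["a", "e", "i", "o", "u", "y"] : List String).contains (String.ofList [lettre])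
      then h ++ [(1 : Int)] else h ++ [2]) []
      = cs.map pvDigit := by
  have hf : (fun (h : List Int) (lettre : Char) =>
      if (["a", "e", "i", "o", "u", "y"] : List String).contains (String.ofList [lettre])
      then h ++ [(1 : Int)] else h ++ [2])
      = fun h lettre => h ++ [pvDigit lettre] := by
    funext h c
    rw [pv_voy_eq]
    simp only [pvDigit]
    split <;> simp_all
  rw [hf]
  simpa using PySem.List.foldl_append_singleton_eq_map pvDigit cs []

theorem pv_sum_range (l : List Int) :
    ((List.range l.length).map (fun k => l.getD k 0 * 10 ^ (l.length - 1 - k))).sum = pvVal l := by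
  induction l with
  | nil => simp [pvVal]
  | cons d tl ih =>
    rw [List.length_cons, List.range_succ_eq_map, List.map_cons, List.map_map]
    have hfun : ((fun k => (d :: tl).getD k 0 * 10 ^ (tl.length + 1 - 1 - k)) ∘ Nat.succ)
        = fun k => tl.getD k 0 * 10 ^ (tl.length - 1 - k) := by
      funext k
      simp only [Function.comp_apply, Nat.succ_eq_add_one, List.getD_cons_succ]
      rw [show tl.length + 1 - 1 - (k + 1) = tl.length - 1 - k from by omega]
    rw [hfun, List.sum_cons, List.getD_cons_zero,
      show tl.length + 1 - 1 - 0 = tl.length from by omega, ih]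
    rfl

-- A's positional sum computes pvVal
theorem pv_sum_eq_val (l : List Int) :
    (PySem.List.pyRange 0 (l.length : Int) 1).foldl
      (fun number i =>
        number + PySem.List.pyGetD l i 0 * 10 ^ (((l.length : Int) - i - 1).toNat)) 0
      = pvVal l := by
  rw [PySem.List.foldl_add, PySem.List.pyRange_zero_nat, List.map_map]
  have hfun : ∀ k ∈ List.range l.length,
      ((fun i => PySem.List.pyGetD l i 0 * 10 ^ (((l.length : Int) - i - 1).toNat)) ∘ (fun k : Nat => (k : Int))) k
        = l.getD k 0 * 10 ^ (l.length - 1 - k) := by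
    intro k hk
    rw [List.mem_range] at hk
    simp only [Function.comp_apply, PySem.List.pyGetD_natCast]
    rw [show (((l.length : Int)) - (k : Int) - 1).toNat = l.length - 1 - k from by omega]
  rw [List.map_congr_left hfun, pv_sum_range]
  ring

-- Horner with an accumulator
theorem pv_horner_acc (l : List Int) (a : Int) :
    l.foldl (fun acc d => acc * 10 + d) a = a * 10 ^ l.length + pvVal l := by
  induction l generalizing a with
  | nil => simp [pvVal]
  | cons d tl ih =>
    simp only [List.foldl_cons, ih, pvVal, List.length_cons]
    ring

theorem pv_fmod_add_mul (a k t : Int) : Int.fmod (a + k * t) t = Int.fmod a t := by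
  rw [Int.fmod_eq_emod, Int.fmod_eq_emod]
  have he : (a + k * t) % t = a % t := by
    rw [show k * t = t * k from mul_comm k t]
    exact Int.add_mul_emod_self_left a t k
  have htk : t ∣ k * t := dvd_mul_left t k
  have hd : t ∣ a + k * t ↔ t ∣ a := by
    constructor <;> intro h
    · simpa using dvd_sub h htk
    · exact dvd_add h htk
  simp [he, hd]

-- B's mod-at-every-step Horner = mod of the plain Horner value
theorem pv_horner_mod (t : Int) (l : List Int) (a : Int) :
    l.foldl (fun acc d => PySem.Int.mod (acc * 10 + d) t) (Int.fmod a t)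
      = Int.fmod (l.foldl (fun acc d => acc * 10 + d) a) t := by
  induction l generalizing a with
  | nil => simp
  | cons d tl ih =>
    simp only [List.foldl_cons, PySem.Int.mod]
    have h1 : Int.fmod a t * 10 + d = (a * 10 + d) + (-(PySem.Int.floordiv a t) * 10) * t := by
      have := PySem.Int.floordiv_mul_add_mod a t
      have hm : PySem.Int.mod a t = Int.fmod a t := rfl
      rw [hm] at this
      nlinarith [this]
    rw [h1, pv_fmod_add_mul]
    exact ih (a * 10 + d)

-- ===== VERDICT (by name: the statement is the Claim_ definition above) =====
theorem hachage_paul_spec : Claim_equal_hachage_paul := by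
  intro mot t _ _
  unfold Spec_hachage_paul hachage_paul hachage_paul_alt
  simp only []
  rw [pv_hA_eq mot.toList, pv_sum_eq_val]
  have hB : mot.toList.foldl
      (fun acc lettre =>
        PySem.Int.mod (acc * 10 + (if ("aeiouy".toList).contains lettre then 1 else 2)) t) 0
      = (mot.toList.map pvDigit).foldl (fun acc d => PySem.Int.mod (acc * 10 + d) t) 0 := by
    rw [List.foldl_map]
    rfl
  rw [hB]
  have h0 : (0 : Int) = Int.fmod 0 t := by simp
  rw [h0, pv_horner_mod t (mot.toList.map pvDigit) 0, pv_horner_acc]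
  simp [PySem.Int.mod]
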